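-- pv_equiv track=rewrite | github.com/Yan921227/Tflite | Pipeline.py | group_frames
-- ===== SOURCE A (Python) =====
-- def group_frames(candidates, max_gap):
--     if not candidates:
--         return []
--
--     candidates = sorted(candidates, key=lambda x: x["frame"])
--     groups = []
--     current = [candidates[0]]
--
--     for c in candidates[1:]:
--         if c["frame"] - current[-1]["frame"] <= max_gap:
--             current.append(c)
--         else:
--             groups.append(current)
--             current = [c]
--     groups.append(current)
--
--     rep_frames = []
--     for g in groups:
--         best = max(g, key=lambda x: x["conf"])
--         rep_frames.append(best["frame"])
--     return rep_frames
-- ===== SOURCE B (Python) =====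
-- def group_frames(candidates, max_gap):
--     cs = sorted(candidates, key=lambda x: x["frame"])
--     if not cs:
--         return []
--     result = []
--     best_frame = cs[0]["frame"]
--     best_conf = cs[0]["conf"]
--     last_frame = best_frame
--     for c in cs[1:]:
--         f = c["frame"]
--         conf = c["conf"]
--         if f - last_frame > max_gap:
--             result.append(best_frame)
--             best_frame = f
--             best_conf = conf
--         elif conf > best_conf:
--             best_frame = f
--             best_conf = conf
--         last_frame = f
--     result.append(best_frame)
--     return result
-- ===== Notes on version B (the rewrite author's own statement) =====
-- stated objective: simpler
-- what changed: B fuses A's two phases (build a list of groups, then map max-by-conf over each group) into one pass over the sorted list that maintains only the running best frame/conf and the last frame, never materialising the groups.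
import Mathlib
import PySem

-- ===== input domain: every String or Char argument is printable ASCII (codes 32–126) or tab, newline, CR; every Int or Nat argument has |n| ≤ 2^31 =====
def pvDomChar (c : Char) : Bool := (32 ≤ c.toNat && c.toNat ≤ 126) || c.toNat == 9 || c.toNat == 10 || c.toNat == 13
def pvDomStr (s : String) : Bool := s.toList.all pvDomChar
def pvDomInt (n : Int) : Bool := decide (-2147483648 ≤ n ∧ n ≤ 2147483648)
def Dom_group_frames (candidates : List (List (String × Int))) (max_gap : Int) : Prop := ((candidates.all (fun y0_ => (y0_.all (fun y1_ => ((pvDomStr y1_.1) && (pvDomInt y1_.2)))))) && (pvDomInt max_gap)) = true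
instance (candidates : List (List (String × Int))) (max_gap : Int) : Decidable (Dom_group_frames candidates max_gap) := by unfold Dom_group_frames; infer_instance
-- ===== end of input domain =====

-- B fuses A's two phases (group building, then max-by-conf per group) into one pass
-- over the sorted list keeping only the running best; objective: simpler.

-- dict lookup x["frame"] / x["conf"]: first matching key (Pre_ guarantees presence;
-- the 0 default is never reached inside Pre_, where Python raises KeyError instead)
def pvGetF (d : List (String × Int)) : Int := ((d.find? (fun p => p.1 == "frame")).map Prod.snd).getD 0
def pvGetC (d : List (String × Int)) : Int := ((d.find? (fun p => p.1 == "conf")).map Prod.snd).getD 0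

-- ===== PORT A =====
-- best = max(g, key=…); the none branch is unreachable (groups are nonempty)
def pvRep (g : List (List (String × Int))) : Int :=
  match PySem.List.max? g pvGetC with
  | some b => pvGetF b
  | none => 0

-- the body of A's grouping loop (c0 is a dummy default for current[-1]; current is never empty)
def pvStepA (max_gap : Int) (c0 : List (String × Int))
    (st : List (List (List (String × Int))) × List (List (String × Int)))
    (c : List (String × Int)) :
    List (List (List (String × Int))) × List (List (String × Int)) :=
  if pvGetF c - pvGetF (st.2.getLastD c0) ≤ max_gap then (st.1, st.2 ++ [c])
  else (st.1 ++ [st.2], [c])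

def group_frames (candidates : List (List (String × Int))) (max_gap : Int) : List Int :=
  if candidates = [] then []
  else
    match PySem.List.sorted candidates pvGetF false with
    | [] => []
    | c0 :: rest =>
      let st := rest.foldl (pvStepA max_gap c0) ([], [c0])
      let groups := st.1 ++ [st.2]
      groups.map pvRep

-- ===== PORT B =====
-- state = (result, best_frame, best_conf, last_frame)
def pvStepB (max_gap : Int) (st : List Int × Int × Int × Int) (c : List (String × Int)) :
    List Int × Int × Int × Int :=
  let f := pvGetF c
  let cf := pvGetC c
  if f - st.2.2.2 > max_gap then (st.1 ++ [st.2.1], f, cf, f)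
  else if cf > st.2.2.1 then (st.1, f, cf, f)
  else (st.1, st.2.1, st.2.2.1, f)

def group_frames_alt (candidates : List (List (String × Int))) (max_gap : Int) : List Int :=
  match PySem.List.sorted candidates pvGetF false with
  | [] => []
  | c0 :: rest =>
    let st := rest.foldl (pvStepB max_gap) ([], pvGetF c0, pvGetC c0, pvGetF c0)
    st.1 ++ [st.2.1]

-- ===== PRECONDITION & SPEC =====
-- Pre_ excludes exactly the inputs where Python A raises KeyError: a candidate dict
-- missing the key "frame" or "conf".
def Pre_group_frames (candidates : List (List (String × Int))) (max_gap : Int) : Prop :=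
  candidates.all (fun d => d.any (fun p => p.1 == "frame") && d.any (fun p => p.1 == "conf")) = true
instance (candidates : List (List (String × Int))) (max_gap : Int) : Decidable (Pre_group_frames candidates max_gap) := by unfold Pre_group_frames; infer_instance

def pvWitness_group_frames : (List (List (String × Int))) × Int :=
  ([[("frame", 1), ("conf", 5)], [("frame", 3), ("conf", 7)], [("frame", 10), ("conf", 2)]], 2)

def Spec_group_frames (candidates : List (List (String × Int))) (max_gap : Int) (out : List Int) : Prop := out = group_frames_alt candidates max_gap
instance (candidates : List (List (String × Int))) (max_gap : Int) (out : List Int) : Decidable (Spec_group_frames candidates max_gap out) := by unfold Spec_group_frames; infer_instance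

-- ===== CLAIM (what is proved, stated in full; the proofs are below) =====
def Claim_equal_group_frames : Prop := ∀ (candidates : List (List (String × Int))) (max_gap : Int), Dom_group_frames candidates max_gap → Pre_group_frames candidates max_gap → Spec_group_frames candidates max_gap (group_frames candidates max_gap)

-- ===== LEMMAS AND PROOFS =====

-- running-max over an extended group: max? is a foldl, so appending one element
-- updates the first-maximal representative exactly like B's strict comparison
theorem pvMax_append (g : List (List (String × Int))) (c m : List (String × Int))
    (h : PySem.List.max? g pvGetC = some m) :
    PySem.List.max? (g ++ [c]) pvGetC =
      (if pvGetC m < pvGetC c then some c else some m) := by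
  simp [PySem.List.max?, List.foldl_append]
  simp [PySem.List.max?] at h
  rw [h]

-- loop invariant: after running both loops from matching states, the outputs agree.
-- A-state (gs, cur) with max? cur = some m; B-state (gs.map pvRep, frame m, conf m, frame of cur's last)
theorem pvLoop (max_gap : Int) (c0 : List (String × Int)) :
    ∀ (rest : List (List (String × Int)))
      (gs : List (List (List (String × Int)))) (cur : List (List (String × Int)))
      (m : List (String × Int)),
      PySem.List.max? cur pvGetC = some m →
      (((rest.foldl (pvStepA max_gap c0) (gs, cur)).1 ++
          [(rest.foldl (pvStepA max_gap c0) (gs, cur)).2]).map pvRep =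
        (rest.foldl (pvStepB max_gap)
            (gs.map pvRep, pvGetF m, pvGetC m, pvGetF (cur.getLastD c0))).1 ++
          [(rest.foldl (pvStepB max_gap)
              (gs.map pvRep, pvGetF m, pvGetC m, pvGetF (cur.getLastD c0))).2.1]) := by
  intro rest
  induction rest with
  | nil =>
    intro gs cur m hm
    simp [List.foldl, pvRep, hm]
  | cons c rest ih =>
    intro gs cur m hm
    rw [List.foldl_cons, List.foldl_cons]
    by_cases hgap : pvGetF c - pvGetF (cur.getLastD c0) ≤ max_gap
    · -- same group: A appends to current, B takes one of the non-flush branches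
      have hA : pvStepA max_gap c0 (gs, cur) c = (gs, cur ++ [c]) := by
        simp only [pvStepA]; split_ifs <;> first | rfl | omega
      rw [hA]
      by_cases hconf : pvGetC m < pvGetC c
      · have hB : pvStepB max_gap (gs.map pvRep, pvGetF m, pvGetC m, pvGetF (cur.getLastD c0)) c
            = (gs.map pvRep, pvGetF c, pvGetC c, pvGetF c) := by
          simp only [pvStepB]; split_ifs <;> first | rfl | omega
        rw [hB]
        have hm' : PySem.List.max? (cur ++ [c]) pvGetC = some c := by
          rw [pvMax_append cur c m hm]; simp [hconf]
        have := ih gs (cur ++ [c]) c hm'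
        simpa using this
      · have hB : pvStepB max_gap (gs.map pvRep, pvGetF m, pvGetC m, pvGetF (cur.getLastD c0)) c
            = (gs.map pvRep, pvGetF m, pvGetC m, pvGetF c) := by
          simp only [pvStepB]; split_ifs <;> first | rfl | omega
        rw [hB]
        have hm' : PySem.List.max? (cur ++ [c]) pvGetC = some m := by
          rw [pvMax_append cur c m hm]; simp [hconf]
        have := ih gs (cur ++ [c]) m hm'
        simpa using this
    · -- gap too large: A closes the group, B flushes the running best
      have hA : pvStepA max_gap c0 (gs, cur) c = (gs ++ [cur], [c]) := by
        simp only [pvStepA]; split_ifs <;> first | rfl | omega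
      have hB : pvStepB max_gap (gs.map pvRep, pvGetF m, pvGetC m, pvGetF (cur.getLastD c0)) c
          = (gs.map pvRep ++ [pvGetF m], pvGetF c, pvGetC c, pvGetF c) := by
        simp only [pvStepB]; split_ifs <;> first | rfl | omega
      rw [hA, hB]
      have hm' : PySem.List.max? ([c] : List (List (String × Int))) pvGetC = some c := by
        simp [PySem.List.max?]
      have := ih (gs ++ [cur]) [c] c hm'
      simpa [pvRep, hm] using this

-- ===== VERDICT (by name: the statement is the Claim_ definition above) =====
theorem group_frames_spec : Claim_equal_group_frames := by
  intro candidates max_gap _ _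
  unfold Spec_group_frames group_frames group_frames_alt
  by_cases hnil : candidates = []
  · simp [hnil, PySem.List.sorted]
  · simp only [hnil, if_false]
    cases hs : PySem.List.sorted candidates pvGetF false with
    | nil => rfl
    | cons c0 rest =>
      have hm : PySem.List.max? ([c0] : List (List (String × Int))) pvGetC = some c0 := by
        simp [PySem.List.max?]
      have := pvLoop max_gap c0 rest [] [c0] c0 hm
      simpa using this
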